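-- pv_equiv track=rewrite | github.com/sgatto/boomerang-score | src/boomerang_score/services/export_service.py | _distribute_entries_to_circles
-- ===== SOURCE A (Python) =====
-- def _distribute_entries_to_circles(participant_order: list[str], num_circles: int, sort_method: str):
--     """Distribute participants into circles."""
--     circles_data = [[] for _ in range(num_circles)]
--
--     if sort_method == "Rank":
--         # Cyclic distribution for rank-based sorting
--         for idx, p_id in enumerate(participant_order):
--             circle_idx = idx % num_circles
--             circles_data[circle_idx].append(p_id)
--     else:
--         # Sequential distribution for startnr-based sorting
--         total_entries = len(participant_order)
--         entries_per_circle = max(1, (total_entries + num_circles - 1) // num_circles)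
--         for idx, p_id in enumerate(participant_order):
--             circle_idx = idx // entries_per_circle
--             if circle_idx >= num_circles:
--                 circle_idx = num_circles - 1
--             circles_data[circle_idx].append(p_id)
--
--     return circles_data
-- ===== SOURCE B (Python) =====
-- def _distribute_entries_to_circles(participant_order: list[str], num_circles: int, sort_method: str):
--     """Distribute participants into circles (per-circle slicing)."""
--     if sort_method == "Rank":
--         return [participant_order[c::num_circles] for c in range(num_circles)]
--     total_entries = len(participant_order)
--     entries_per_circle = max(1, (total_entries + num_circles - 1) // num_circles)
--     return [participant_order[c * entries_per_circle:(c + 1) * entries_per_circle]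
--             if c < num_circles - 1
--             else participant_order[(num_circles - 1) * entries_per_circle:]
--             for c in range(num_circles)]
-- ===== Notes on version B (the rewrite author's own statement) =====
-- stated objective: alternative
-- what changed: Replaces A's single-pass scatter (one loop over entries appending to a mutable bucket picked by index arithmetic) with a per-circle gather: each circle is one slice of participant_order (a strided slice participant_order[c::num_circles] for 'Rank', a contiguous block slice otherwise, with the overflow going to the last circle).
import Mathlib
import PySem

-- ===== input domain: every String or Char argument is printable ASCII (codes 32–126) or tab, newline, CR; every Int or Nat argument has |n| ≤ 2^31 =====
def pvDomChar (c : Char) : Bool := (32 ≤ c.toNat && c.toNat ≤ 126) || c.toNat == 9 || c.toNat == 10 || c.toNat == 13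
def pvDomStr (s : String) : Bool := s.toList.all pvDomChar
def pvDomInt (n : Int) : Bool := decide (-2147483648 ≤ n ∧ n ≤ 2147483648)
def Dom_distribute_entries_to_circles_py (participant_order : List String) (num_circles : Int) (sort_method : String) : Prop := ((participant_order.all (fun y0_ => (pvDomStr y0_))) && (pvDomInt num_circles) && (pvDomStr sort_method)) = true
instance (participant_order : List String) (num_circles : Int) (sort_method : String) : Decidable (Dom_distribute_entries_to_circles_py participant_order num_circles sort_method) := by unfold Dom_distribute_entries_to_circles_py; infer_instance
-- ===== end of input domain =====

-- B replaces A's single-pass scatter into mutable buckets by a per-circle slicing gather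
-- (a strided slice per circle for "Rank", a contiguous slice per circle otherwise);
-- equal return values on Pre_.

-- ===== PORT A =====
def distribute_entries_to_circles_py (participant_order : List String) (num_circles : Int) (sort_method : String) : List (List String) :=
  -- circles_data = [[] for _ in range(num_circles)]
  let circles_data : List (List String) := (PySem.List.pyRange 0 num_circles 1).map (fun _ => [])
  if sort_method == "Rank" then
    -- for idx, p_id in enumerate(...): circles_data[idx % num_circles].append(p_id)
    -- (pyGetD/pySetD are the total forms; inside Pre_ the index is always in range)
    (PySem.List.enumerate participant_order 0).foldl (fun cd p =>
      let circle_idx := PySem.Int.mod p.1 num_circles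
      PySem.List.pySetD cd circle_idx (PySem.List.pyGetD cd circle_idx [] ++ [p.2])) circles_data
  else
    let total_entries : Int := PySem.List.len participant_order
    let entries_per_circle : Int := max 1 (PySem.Int.floordiv (total_entries + num_circles - 1) num_circles)
    (PySem.List.enumerate participant_order 0).foldl (fun cd p =>
      let ci0 := PySem.Int.floordiv p.1 entries_per_circle
      let circle_idx := if ci0 ≥ num_circles then num_circles - 1 else ci0
      PySem.List.pySetD cd circle_idx (PySem.List.pyGetD cd circle_idx [] ++ [p.2])) circles_data

-- ===== PORT B =====
def distribute_entries_to_circles_py_alt (participant_order : List String) (num_circles : Int) (sort_method : String) : List (List String) :=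
  if sort_method == "Rank" then
    -- [participant_order[c::num_circles] for c in range(num_circles)]
    -- (slice? is none only for step num_circles = 0, and then the range is empty: .getD [] is unreachable)
    (PySem.List.pyRange 0 num_circles 1).map (fun c =>
      (PySem.List.slice? participant_order (some c) none num_circles).getD [])
  else
    let total_entries : Int := PySem.List.len participant_order
    let entries_per_circle : Int := max 1 (PySem.Int.floordiv (total_entries + num_circles - 1) num_circles)
    (PySem.List.pyRange 0 num_circles 1).map (fun c =>
      if c < num_circles - 1 then
        PySem.List.slice participant_order (some (c * entries_per_circle)) (some ((c + 1) * entries_per_circle))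
      else
        PySem.List.slice participant_order (some ((num_circles - 1) * entries_per_circle)) none)

-- ===== PRECONDITION & SPEC =====
-- Pre_ excludes exactly the inputs where Python A raises: num_circles ≤ 0 with a non-empty list
-- (IndexError / ZeroDivisionError), and num_circles = 0 with sort_method ≠ "Rank" (ZeroDivisionError
-- computing entries_per_circle even for an empty list).
def Pre_distribute_entries_to_circles_py (participant_order : List String) (num_circles : Int) (sort_method : String) : Prop :=
  1 ≤ num_circles ∨ (participant_order = [] ∧ (num_circles < 0 ∨ sort_method = "Rank"))
instance (participant_order : List String) (num_circles : Int) (sort_method : String) : Decidable (Pre_distribute_entries_to_circles_py participant_order num_circles sort_method) := by unfold Pre_distribute_entries_to_circles_py; infer_instance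

def pvWitness_distribute_entries_to_circles_py : List String × Int × String := (["a", "b", "c"], 2, "Rank")

def Spec_distribute_entries_to_circles_py (participant_order : List String) (num_circles : Int) (sort_method : String) (out : List (List String)) : Prop := out = distribute_entries_to_circles_py_alt participant_order num_circles sort_method
instance (participant_order : List String) (num_circles : Int) (sort_method : String) (out : List (List String)) : Decidable (Spec_distribute_entries_to_circles_py participant_order num_circles sort_method out) := by unfold Spec_distribute_entries_to_circles_py; infer_instance

-- ===== CLAIM (what is proved, stated in full; the proofs are below) =====
def Claim_equal_distribute_entries_to_circles_py : Prop := ∀ (participant_order : List String) (num_circles : Int) (sort_method : String), Dom_distribute_entries_to_circles_py participant_order num_circles sort_method → Pre_distribute_entries_to_circles_py participant_order num_circles sort_method → Spec_distribute_entries_to_circles_py participant_order num_circles sort_method (distribute_entries_to_circles_py participant_order num_circles sort_method)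

-- ===== LEMMAS AND PROOFS =====

-- scatter loop = per-bucket gather: appending each pair's value to bucket (g pair.1 pair.2) of cd
-- yields, bucket by bucket, the old bucket followed by the values whose key maps to it.
lemma pv_scatter_eq_gather (g : Int → String → Int) (l : List (Int × String)) :
    ∀ (cd : List (List String)),
      (∀ p ∈ l, 0 ≤ g p.1 p.2 ∧ g p.1 p.2 < (cd.length : Int)) →
      l.foldl (fun acc p =>
          PySem.List.pySetD acc (g p.1 p.2) (PySem.List.pyGetD acc (g p.1 p.2) [] ++ [p.2])) cd
      = (List.range cd.length).map
          (fun c => cd.getD c [] ++ ((l.filter (fun p => g p.1 p.2 == (c : Int))).map (·.2))) := by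
  induction l with
  | nil =>
    intro cd _
    simp only [List.foldl_nil, List.filter_nil, List.map_nil, List.append_nil]
    apply List.ext_getElem (by simp)
    intro c h1 h2
    simp [List.getD_eq_getElem?_getD, List.getElem?_eq_getElem (by simpa using h2)]
  | cons p t ih =>
    intro cd h
    obtain ⟨h0, hlt⟩ := h p (by simp)
    have hnat : (g p.1 p.2).toNat < cd.length := by omega
    have hset : PySem.List.pySetD cd (g p.1 p.2) (PySem.List.pyGetD cd (g p.1 p.2) [] ++ [p.2])
        = cd.set (g p.1 p.2).toNat (cd[(g p.1 p.2).toNat] ++ [p.2]) := by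
      rw [PySem.List.pyGetD_eq_getElem cd (i := g p.1 p.2) [] h0 (by simpa using hlt)]
      simp [PySem.List.pySetD, PySem.List.pySet?, PySem.List.pyIdx?, h0, hlt]
    rw [List.foldl_cons, hset, ih _ (by simpa using fun q hq => h q (List.mem_cons_of_mem _ hq))]
    simp only [List.length_set]
    apply List.map_congr_left
    intro c hc
    have hc' : c < cd.length := List.mem_range.mp hc
    have hgetD : ∀ (ys : List (List String)) (hy : c < ys.length), ys.getD c [] = ys[c] := by
      intro ys hy; simp [List.getD_eq_getElem?_getD, List.getElem?_eq_getElem hy]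
    rw [hgetD _ (by simpa using hc'), hgetD _ hc', List.getElem_set]
    by_cases hceq : g p.1 p.2 == (c : Int)
    · have : (g p.1 p.2).toNat = c := by simp at hceq; omega
      simp [this, hceq]
    · have : ¬ (g p.1 p.2).toNat = c := by simp at hceq ⊢; omega
      simp [this, hceq]

lemma pv_mem_enumerate_lb (po : List String) (s : Int) (p : Int × String)
    (hp : p ∈ PySem.List.enumerate po s) : s ≤ p.1 ∧ p.1 < s + po.length := by
  rw [PySem.List.mem_enumerate_iff] at hp
  obtain ⟨k, hk, rfl⟩ := hp
  constructor <;> simp <;> omega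

lemma pv_init_getD (nc : Int) (c : Nat) :
    ((PySem.List.pyRange 0 nc 1).map (fun _ => ([] : List String))).getD c [] = [] := by
  rcases lt_or_ge c ((PySem.List.pyRange 0 nc 1).map (fun _ => ([] : List String))).length with h | h
  · simp [List.getD_eq_getElem?_getD, List.getElem?_eq_getElem h]
  · simp [List.getD_eq_getElem?_getD, List.getElem?_eq_none_iff.mpr h]

-- A's branch loop, closed form: circle c holds the entries whose index maps to c under g
lemma pv_branch (po : List String) (nc : Int) (g : Int → String → Int) (hnc : 1 ≤ nc)
    (hrange : ∀ p ∈ PySem.List.enumerate po 0, 0 ≤ g p.1 p.2 ∧ g p.1 p.2 < nc) :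
    (PySem.List.enumerate po 0).foldl (fun acc p =>
        PySem.List.pySetD acc (g p.1 p.2) (PySem.List.pyGetD acc (g p.1 p.2) [] ++ [p.2]))
      ((PySem.List.pyRange 0 nc 1).map (fun _ => []))
    = (PySem.List.pyRange 0 nc 1).map (fun c =>
        ((PySem.List.enumerate po 0).filter (fun p => g p.1 p.2 == c)).map (·.2)) := by
  have hlen : (((PySem.List.pyRange 0 nc 1).map (fun _ => ([] : List String))).length : Int) = nc := by
    simp [PySem.List.length_pyRange_one]; omega
  rw [pv_scatter_eq_gather g _ _ (by
    intro p hp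
    obtain ⟨h1, h2⟩ := hrange p hp
    exact ⟨h1, by rw [hlen]; exact h2⟩)]
  apply List.ext_getElem (by simp [PySem.List.length_pyRange_one])
  intro k h1 h2
  simp only [List.getElem_map, List.getElem_range, PySem.List.getElem_pyRange_one,
    pv_init_getD, List.nil_append, zero_add]

-- take-every-nc-th helper (proof-side only): what a strided slice collects
def pvEvery (m : Nat) : List String → List String
  | [] => []
  | x :: t => x :: pvEvery m (t.drop (m - 1))
termination_by l => l.length
decreasing_by simp

lemma pvEvery_nil (m : Nat) : pvEvery m [] = [] := by rw [pvEvery]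

lemma pvEvery_cons (m : Nat) (x : String) (t : List String) :
    pvEvery m (x :: t) = x :: pvEvery m (t.drop (m - 1)) := by rw [pvEvery]

-- gather side of "Rank": the entries at index ≡ c (mod nc) are every nc-th entry from index c on
lemma pv_filter_mod (nc : Int) (hnc : 1 ≤ nc) (po : List String) :
    ∀ (s c : Int), s ≤ c → c < s + nc →
    ((PySem.List.enumerate po s).filter
        (fun p => PySem.Int.mod p.1 nc == PySem.Int.mod c nc)).map (·.2)
    = pvEvery nc.toNat (po.drop (c - s).toNat) := by
  induction po with
  | nil => intro s c _ _; simp [pvEvery_nil]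
  | cons x t ih =>
    intro s c hsc hcs
    rw [PySem.List.enumerate_cons, List.filter_cons]
    by_cases heq : s = c
    · subst heq
      have htrue : (PySem.Int.mod s nc == PySem.Int.mod s nc) = true := by simp
      rw [if_pos htrue]
      have hcongr : List.filter (fun p => PySem.Int.mod p.1 nc == PySem.Int.mod s nc)
            (PySem.List.enumerate t (s + 1))
          = List.filter (fun p => PySem.Int.mod p.1 nc == PySem.Int.mod (s + nc) nc)
            (PySem.List.enumerate t (s + 1)) := by
        apply List.filter_congr
        intro p _
        have : PySem.Int.mod (s + nc) nc = PySem.Int.mod s nc := by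
          rw [PySem.Int.mod_eq_emod_of_pos (by omega), PySem.Int.mod_eq_emod_of_pos (by omega)]
          exact Int.add_emod_right s nc
        rw [this]
      rw [List.map_cons, hcongr, ih (s + 1) (s + nc) (by omega) (by omega)]
      have h1 : (s + nc - (s + 1)).toNat = nc.toNat - 1 := by omega
      have h2 : (s - s).toNat = 0 := by omega
      rw [h1, h2, List.drop_zero, pvEvery_cons]
    · have hfalse : (PySem.Int.mod s nc == PySem.Int.mod c nc) = false := by
        simp only [beq_eq_false_iff_ne, ne_eq]
        rw [PySem.Int.mod_eq_emod_of_pos (by omega), PySem.Int.mod_eq_emod_of_pos (by omega)]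
        intro hmod
        have hdvd : nc ∣ (c - s) := by
          have h' : (c - s) % nc = 0 := by
            rw [Int.sub_emod, hmod, sub_self, Int.zero_emod]
          exact Int.dvd_of_emod_eq_zero h'
        obtain ⟨q, hq⟩ := hdvd
        have h0 : 0 < c - s := by omega
        have h1 : c - s < nc := by omega
        rcases le_or_gt q 0 with hq0 | hq0
        · nlinarith
        · nlinarith
      rw [if_neg (by simp [hfalse]), ih (s + 1) c (by omega) (by omega)]
      have : (c - s).toNat = (c - (s + 1)).toNat + 1 := by omega
      rw [this, List.drop_succ_cons]

-- slice side of "Rank": the canonical strided filterMap is the same every-nc-th list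
lemma pv_filterMap_stride (nc : Int) (hnc : 1 ≤ nc) :
    ∀ (n : Nat) (po : List String), po.length ≤ n →
    List.filterMap (fun (k : Nat) => po[(nc * (k : Int)).toNat]?)
        (List.range (((po.length : Int) + nc - 1) / nc).toNat)
    = pvEvery nc.toNat po := by
  intro n
  induction n with
  | zero =>
    intro po hpo
    have : po = [] := List.eq_nil_of_length_eq_zero (by omega)
    subst this
    have : (((0 : Int) + nc - 1) / nc).toNat = 0 := by
      have h1 : (nc - 1) / nc = 0 := Int.ediv_eq_zero_of_lt (by omega) (by omega)
      simp only [Int.zero_add]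
      omega
    simp [this, pvEvery_nil]
  | succ n ih =>
    intro po hpo
    match po with
    | [] =>
      have : (((0 : Int) + nc - 1) / nc).toNat = 0 := by
        have h1 : (nc - 1) / nc = 0 := Int.ediv_eq_zero_of_lt (by omega) (by omega)
        simp only [Int.zero_add]
        omega
      simp [pvEvery_nil]
    | x :: t =>
      have hlen1 : 1 ≤ ((x :: t).length : Int) := by simp
      have hcount : ((((x :: t).length : Int) + nc - 1) / nc).toNat
          = (((((x :: t).drop nc.toNat).length : Int) + nc - 1) / nc).toNat + 1 := by
        have hdroplen : (((x :: t).drop nc.toNat).length : Int) = max ((x :: t).length - nc) 0 := by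
          simp [List.length_drop]; omega
        rcases le_or_gt nc ((x :: t).length : Int) with hle | hlt
        · have : ((x :: t).length : Int) + nc - 1 = ((x :: t).length - nc + nc - 1) + 1 * nc := by ring
          rw [this, Int.add_mul_ediv_right _ _ (by omega : nc ≠ 0)]
          have hge : 0 ≤ ((x :: t).length - nc + nc - 1) / nc :=
            Int.ediv_nonneg (by omega) (by omega)
          rw [hdroplen]
          have : max (((x :: t).length : Int) - nc) 0 = (x :: t).length - nc := by omega
          rw [this]
          omega
        · have h1 : (((x :: t).length : Int) + nc - 1) / nc = 1 := by
            have hsplit : ((x :: t).length : Int) + nc - 1 = (((x :: t).length : Int) - 1) + 1 * nc := by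
              ring
            rw [hsplit, Int.add_mul_ediv_right _ _ (by omega : nc ≠ 0),
              Int.ediv_eq_zero_of_lt (by omega) (by omega)]
            norm_num
          have h2 : max (((x :: t).length : Int) - nc) 0 = 0 := by omega
          rw [h1, hdroplen, h2]
          have : ((0 : Int) + nc - 1) / nc = 0 := by
            simp only [Int.zero_add]
            exact Int.ediv_eq_zero_of_lt (by omega) (by omega)
          omega
      rw [hcount, List.range_succ_eq_map]
      have hhead : (x :: t)[(nc * ((0 : Nat) : Int)).toNat]? = some x := by norm_num
      rw [List.filterMap_cons_some (f := fun k : Nat => (x :: t)[(nc * (k : Int)).toNat]?) hhead,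
        List.filterMap_map]
      have hstep : ∀ k : Nat, (x :: t)[(nc * ((Nat.succ k : Nat) : Int)).toNat]?
          = ((x :: t).drop nc.toNat)[(nc * (k : Int)).toNat]? := by
        intro k
        have hmul : nc * ((Nat.succ k : Nat) : Int) = nc * (k : Int) + nc := by push_cast; ring
        have h0 : 0 ≤ nc * (k : Int) := by positivity
        have htn : (nc * ((Nat.succ k : Nat) : Int)).toNat = nc.toNat + (nc * (k : Int)).toNat := by
          omega
        rw [htn, List.getElem?_drop]
      have hcongr2 : List.filterMap
            ((fun k : Nat => (x :: t)[(nc * (k : Int)).toNat]?) ∘ Nat.succ)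
            (List.range (((((x :: t).drop nc.toNat).length : Int) + nc - 1) / nc).toNat)
          = List.filterMap (fun (k : Nat) => ((x :: t).drop nc.toNat)[(nc * (k : Int)).toNat]?)
            (List.range (((((x :: t).drop nc.toNat).length : Int) + nc - 1) / nc).toNat) :=
        List.filterMap_congr (fun k _ => hstep k)
      rw [hcongr2, ih ((x :: t).drop nc.toNat) (by
        simp only [List.length_drop, List.length_cons] at hpo ⊢
        omega)]
      have hdc : (x :: t).drop nc.toNat = t.drop (nc.toNat - 1) := by
        conv_lhs => rw [show nc.toNat = (nc.toNat - 1) + 1 from by omega]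
        rw [List.drop_succ_cons]
      rw [hdc, pvEvery_cons]

-- B's strided slice participant_order[c::nc] collects every nc-th entry from index c on
lemma pv_slice_stride (nc : Int) (hnc : 1 ≤ nc) (po : List String) (c : Int) (hc0 : 0 ≤ c) :
    (PySem.List.slice? po (some c) none nc).getD []
    = pvEvery nc.toNat (po.drop c.toNat) := by
  rw [PySem.List.slice?]
  have hne : ¬ nc = 0 := by omega
  rw [if_neg hne]
  simp only [PySem.List.sliceIndices]
  have hneg : ¬ nc < 0 := by omega
  simp only [if_neg hneg, Option.getD_some]
  have hpos : (0 : Int) < nc := by omega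
  rw [if_pos hpos]
  have hstart : (if c < 0 then max (c + (po.length : Int)) 0 else min c (po.length : Int))
      = min c (po.length : Int) := by
    rw [if_neg (by omega)]
  rw [hstart]
  set s : Int := min c (po.length : Int) with hs
  have hs0 : 0 ≤ s := by simp [hs]; omega
  have hdropeq : po.drop s.toNat = po.drop c.toNat := by
    rcases le_or_gt c (po.length : Int) with h | h
    · have : s = c := by simp [hs]; omega
      rw [this]
    · have h1 : s.toNat = po.length := by simp [hs]; omega
      have h2 : po.length ≤ c.toNat := by omega
      rw [h1, List.drop_length, List.drop_eq_nil_of_le h2]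
  by_cases hlt : s < (po.length : Int)
  · rw [if_pos hlt]
    have hcount : ((po.length : Int) - s + nc - 1) / nc
        = (((po.drop s.toNat).length : Int) + nc - 1) / nc := by
      have : ((po.drop s.toNat).length : Int) = (po.length : Int) - s := by
        simp [List.length_drop]; omega
      rw [this]
    have hidx : ∀ k : Nat, po[(s + nc * (k : Int)).toNat]?
        = (po.drop s.toNat)[(nc * (k : Int)).toNat]? := by
      intro k
      have : (s + nc * (k : Int)).toNat = s.toNat + (nc * (k : Int)).toNat := by
        have : 0 ≤ nc * (k : Int) := by positivity
        omega
      rw [this, List.getElem?_drop]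
    calc List.filterMap (fun (k : Nat) => po[(s + nc * (k : Int)).toNat]?)
          (List.range (((po.length : Int) - s + nc - 1) / nc).toNat)
        = List.filterMap (fun (k : Nat) => (po.drop s.toNat)[(nc * (k : Int)).toNat]?)
          (List.range ((((po.drop s.toNat).length : Int) + nc - 1) / nc).toNat) := by
          rw [hcount]
          exact List.filterMap_congr (fun k _ => hidx k)
      _ = pvEvery nc.toNat (po.drop s.toNat) :=
          pv_filterMap_stride nc hnc (po.drop s.toNat).length _ le_rfl
      _ = pvEvery nc.toNat (po.drop c.toNat) := by rw [hdropeq]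
  · rw [if_neg hlt]
    have h1 : po.drop c.toNat = [] := by
      rw [← hdropeq]
      have : po.length ≤ s.toNat := by omega
      exact List.drop_eq_nil_of_le this
    simp [h1, pvEvery]

-- gather side of the sequential branch: entries with index in [a, b) are a contiguous slice
lemma pv_filter_window (po : List String) :
    ∀ (s a b : Int), s ≤ a →
    ((PySem.List.enumerate po s).filter
        (fun p => decide (a ≤ p.1) && decide (p.1 < b))).map (·.2)
    = (po.drop (a - s).toNat).take (b - a).toNat := by
  induction po with
  | nil => intro s a b _; simp
  | cons x t ih =>
    intro s a b hsa
    rw [PySem.List.enumerate_cons, List.filter_cons]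
    by_cases has : a ≤ s
    · have hsa' : s = a := by omega
      subst hsa'
      by_cases hsb : s < b
      · rw [if_pos (by simp [hsb])]
        have hcongr : List.filter (fun p => decide (s ≤ p.1) && decide (p.1 < b))
              (PySem.List.enumerate t (s + 1))
            = List.filter (fun p => decide (s + 1 ≤ p.1) && decide (p.1 < b))
              (PySem.List.enumerate t (s + 1)) := by
          apply List.filter_congr
          intro p hp
          have := (pv_mem_enumerate_lb t (s + 1) p hp).1
          rw [Bool.eq_iff_iff]
          simp only [Bool.and_eq_true, decide_eq_true_eq]
          constructor <;> intro h <;> exact ⟨by omega, h.2⟩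
        rw [List.map_cons, hcongr, ih (s + 1) (s + 1) b (by omega)]
        have h1 : (s + 1 - (s + 1)).toNat = 0 := by omega
        have h2 : (s - s).toNat = 0 := by omega
        have h3 : (b - s).toNat = (b - (s + 1)).toNat + 1 := by omega
        rw [h1, h2, h3, List.drop_zero, List.drop_zero, List.take_succ_cons]
      · rw [if_neg (by simp; omega)]
        have hnil : List.filter (fun p => decide (s ≤ p.1) && decide (p.1 < b))
              (PySem.List.enumerate t (s + 1)) = [] := by
          apply List.filter_eq_nil_iff.mpr
          intro p hp
          have := (pv_mem_enumerate_lb t (s + 1) p hp).1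
          simp
          omega
        rw [hnil]
        have : (b - s).toNat = 0 := by omega
        simp [this]
    · rw [if_neg (by simp; omega)]
      rw [ih (s + 1) a b (by omega)]
      have : (a - s).toNat = (a - (s + 1)).toNat + 1 := by omega
      rw [this, List.drop_succ_cons]

-- ===== VERDICT (by name: the statement is the Claim_ definition above) =====
theorem distribute_entries_to_circles_py_spec : Claim_equal_distribute_entries_to_circles_py := by
  intro po nc sm _ hpre
  unfold Spec_distribute_entries_to_circles_py
  unfold distribute_entries_to_circles_py distribute_entries_to_circles_py_alt
  rcases hpre with hnc | ⟨hpo, _⟩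
  case inr =>
    -- empty participant list: every circle is empty on both sides
    subst hpo
    by_cases hsm : sm == "Rank"
    · simp only [hsm, if_true]
      simp only [PySem.List.enumerate_nil, List.foldl_nil]
      apply List.map_congr_left
      intro c _
      rw [PySem.List.slice?]
      by_cases h0 : nc = 0
      · simp [h0]
      · rw [if_neg h0]
        simp only [Option.getD_some]
        apply Eq.symm
        apply List.filterMap_eq_nil_iff.mpr
        intro k _
        simp
    · simp only [hsm, Bool.false_eq_true, if_false]
      simp only [PySem.List.enumerate_nil, List.foldl_nil]
      apply List.map_congr_left
      intro c hc
      obtain ⟨hc0, _⟩ := (PySem.List.mem_pyRange_one).mp hc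
      have hper1 : (1 : Int) ≤ max 1 (PySem.Int.floordiv (PySem.List.len ([] : List String) + nc - 1) nc) := le_max_left _ _
      split_ifs
      · rw [PySem.List.slice_toNat _ (by positivity) (by positivity)]
        simp
      · rw [PySem.List.slice_some_none]
        simp
  case inl =>
    by_cases hsm : sm == "Rank"
    · -- "Rank": cyclic scatter = strided slices
      simp only [hsm, if_true]
      rw [pv_branch po nc (fun i _ => PySem.Int.mod i nc) hnc
        (fun p _ => ⟨PySem.Int.mod_nonneg _ (by omega), PySem.Int.mod_lt _ (by omega)⟩)]
      apply List.map_congr_left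
      intro c hc
      obtain ⟨hc0, hclt⟩ := (PySem.List.mem_pyRange_one).mp hc
      rw [pv_slice_stride nc hnc po c hc0]
      have hmodc : PySem.Int.mod c nc = c := by
        rw [PySem.Int.mod_eq_emod_of_pos (by omega)]
        exact Int.emod_eq_of_lt hc0 hclt
      have hfm := pv_filter_mod nc hnc po 0 c (by omega) (by omega)
      rw [hmodc] at hfm
      simp only [sub_zero] at hfm
      exact hfm
    · -- sequential: clamped block scatter = contiguous slices
      simp only [hsm, Bool.false_eq_true, if_false]
      set per : Int := max 1 (PySem.Int.floordiv (PySem.List.len po + nc - 1) nc) with hper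
      have hperpos : (0 : Int) < per := by rw [hper]; omega
      have hfun : (fun (acc : List (List String)) (p : Int × String) =>
            let ci0 := PySem.Int.floordiv p.1 per
            let circle_idx := if ci0 ≥ nc then nc - 1 else ci0
            PySem.List.pySetD acc circle_idx (PySem.List.pyGetD acc circle_idx [] ++ [p.2]))
          = (fun acc p =>
            PySem.List.pySetD acc (min (PySem.Int.floordiv p.1 per) (nc - 1))
              (PySem.List.pyGetD acc (min (PySem.Int.floordiv p.1 per) (nc - 1)) [] ++ [p.2])) := by
        funext acc p
        have : (if PySem.Int.floordiv p.1 per ≥ nc then nc - 1 else PySem.Int.floordiv p.1 per)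
            = min (PySem.Int.floordiv p.1 per) (nc - 1) := by
          split_ifs with h <;> omega
        simp only [this]
      rw [hfun, pv_branch po nc (fun i _ => min (PySem.Int.floordiv i per) (nc - 1)) hnc (by
        intro p hp
        have hp0 : 0 ≤ p.1 := (pv_mem_enumerate_lb po 0 p hp).1
        have hdiv : 0 ≤ PySem.Int.floordiv p.1 per := by
          rw [PySem.Int.floordiv_eq_ediv_of_pos hperpos]
          exact Int.ediv_nonneg hp0 (by omega)
        constructor <;> simp only [] <;> omega)]
      apply List.map_congr_left
      intro c hc
      obtain ⟨hc0, hclt⟩ := (PySem.List.mem_pyRange_one).mp hc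
      by_cases hlast : c < nc - 1
      · rw [if_pos (by exact hlast)]
        have hcongr : List.filter
              (fun p => (fun i (_ : String) => min (PySem.Int.floordiv i per) (nc - 1)) p.1 p.2 == c)
              (PySem.List.enumerate po 0)
            = List.filter (fun p => decide (c * per ≤ p.1) && decide (p.1 < (c + 1) * per))
              (PySem.List.enumerate po 0) := by
          apply List.filter_congr
          intro p _
          rw [Bool.eq_iff_iff]
          simp only [beq_iff_eq, Bool.and_eq_true, decide_eq_true_eq]
          rw [PySem.Int.floordiv_eq_ediv_of_pos hperpos]
          constructor
          · intro h
            have hdc : p.1 / per = c := by omega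
            constructor
            · calc c * per = (p.1 / per) * per := by rw [hdc]
                _ ≤ p.1 := Int.ediv_mul_le p.1 (by omega)
            · have := Int.lt_ediv_add_one_mul_self p.1 hperpos
              calc p.1 < (p.1 / per + 1) * per := this
                _ = (c + 1) * per := by rw [hdc]
          · rintro ⟨h1, h2⟩
            have : p.1 / per = c := by
              have ha : c ≤ p.1 / per := Int.le_ediv_iff_mul_le hperpos |>.mpr (by linarith)
              have hb : p.1 / per < c + 1 := Int.ediv_lt_iff_lt_mul hperpos |>.mpr (by linarith)
              omega
            omega
        rw [hcongr, pv_filter_window po 0 (c * per) ((c + 1) * per) (by positivity)]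
        rw [PySem.List.slice_toNat _ (mul_nonneg hc0 (by omega)) (mul_nonneg (by omega) (by omega))]
        have h1 : (c * per - 0).toNat = (c * per).toNat := by omega
        have h2 : ((c + 1) * per - c * per).toNat = ((c + 1) * per).toNat - (c * per).toNat := by
          have hcp : 0 ≤ c * per := by positivity
          have : (c + 1) * per = c * per + per := by ring
          omega
        rw [h1, h2]
      · rw [if_neg hlast]
        have hceq : c = nc - 1 := by omega
        subst hceq
        have hcongr : List.filter
              (fun p => (fun i (_ : String) => min (PySem.Int.floordiv i per) (nc - 1)) p.1 p.2 == nc - 1)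
              (PySem.List.enumerate po 0)
            = List.filter (fun p => decide ((nc - 1) * per ≤ p.1) && decide (p.1 < (0 : Int) + po.length))
              (PySem.List.enumerate po 0) := by
          apply List.filter_congr
          intro p hp
          obtain ⟨hplb, hpub⟩ := pv_mem_enumerate_lb po 0 p hp
          rw [Bool.eq_iff_iff]
          simp only [beq_iff_eq, Bool.and_eq_true, decide_eq_true_eq]
          rw [PySem.Int.floordiv_eq_ediv_of_pos hperpos]
          constructor
          · intro h
            have hdc : nc - 1 ≤ p.1 / per := by omega
            refine ⟨?_, hpub⟩
            calc (nc - 1) * per ≤ (p.1 / per) * per := by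
                  apply mul_le_mul_of_nonneg_right hdc (by omega)
              _ ≤ p.1 := Int.ediv_mul_le p.1 (by omega)
          · rintro ⟨h1, _⟩
            have ha : nc - 1 ≤ p.1 / per := Int.le_ediv_iff_mul_le hperpos |>.mpr (by linarith)
            omega
        rw [hcongr, pv_filter_window po 0 ((nc - 1) * per) ((0 : Int) + po.length) (by positivity)]
        rw [PySem.List.slice_some_none]
        have ha : (0 : Int) ≤ (nc - 1) * per := by positivity
        have h1 : ((nc - 1) * per - 0).toNat = ((nc - 1) * per).toNat := by omega
        rw [h1]
        have h2 : PySem.List.clampIdx po.length ((nc - 1) * per)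
            = min ((nc - 1) * per).toNat po.length := by
          rw [PySem.List.clampIdx, if_neg (by omega)]
        rw [h2]
        rcases le_or_gt (((nc - 1) * per).toNat) po.length with hle | hlt
        · rw [min_eq_left hle]
          have h3 : (0 + (po.length : Int) - (nc - 1) * per).toNat
              = po.length - ((nc - 1) * per).toNat := by omega
          rw [h3]
          apply List.take_of_length_le
          simp [List.length_drop]
        · rw [min_eq_right (by omega), List.drop_length]
          have h4 : po.drop ((nc - 1) * per).toNat = [] := List.drop_eq_nil_of_le (by omega)
          simp [h4]
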